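-- pv_equiv track=rewrite | github.com/deepanshumehtaa/AlekSIS-Core | aleksis/core/util/core_helpers.py | copyright_years
-- ===== SOURCE A (Python) =====
-- from itertools import groupby
-- from operator import itemgetter
-- from typing import Any, Callable, Dict, Optional, Sequence, Union
--
-- def copyright_years(years: Sequence[int], seperator: str = ", ", joiner: str = "–") -> str:
--     """Take a sequence of integegers and produces a string with ranges.
--
--     >>> copyright_years([1999, 2000, 2001, 2005, 2007, 2008, 2009])
--     '1999–2001, 2005, 2007–2009'
--     """
--     ranges = [
--         list(map(itemgetter(1), group))
--         for _, group in groupby(enumerate(years), lambda e: e[1] - e[0])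
--     ]
--     years_strs = [
--         str(range_[0]) if len(range_) == 1 else joiner.join([str(range_[0]), str(range_[-1])])
--         for range_ in ranges
--     ]
--
--     return seperator.join(years_strs)
-- ===== SOURCE B (Python) =====
-- def copyright_years(years, seperator=", ", joiner="\u2013"):
--     it = iter(years)
--     try:
--         start = prev = next(it)
--     except StopIteration:
--         return ""
--     chunks = []
--     for y in it:
--         if y != prev + 1:
--             chunks.append(str(start) if start == prev else joiner.join([str(start), str(prev)]))
--             start = y
--         prev = y
--     chunks.append(str(start) if start == prev else joiner.join([str(start), str(prev)]))
--     return seperator.join(chunks)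
-- ===== Notes on version B (the rewrite author's own statement) =====
-- stated objective: simpler
-- what changed: Replaced the groupby-over-enumerate index-difference trick with a single explicit loop that tracks the current run's start and previous value and flushes a chunk whenever the next year is not prev+1.
import Mathlib
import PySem

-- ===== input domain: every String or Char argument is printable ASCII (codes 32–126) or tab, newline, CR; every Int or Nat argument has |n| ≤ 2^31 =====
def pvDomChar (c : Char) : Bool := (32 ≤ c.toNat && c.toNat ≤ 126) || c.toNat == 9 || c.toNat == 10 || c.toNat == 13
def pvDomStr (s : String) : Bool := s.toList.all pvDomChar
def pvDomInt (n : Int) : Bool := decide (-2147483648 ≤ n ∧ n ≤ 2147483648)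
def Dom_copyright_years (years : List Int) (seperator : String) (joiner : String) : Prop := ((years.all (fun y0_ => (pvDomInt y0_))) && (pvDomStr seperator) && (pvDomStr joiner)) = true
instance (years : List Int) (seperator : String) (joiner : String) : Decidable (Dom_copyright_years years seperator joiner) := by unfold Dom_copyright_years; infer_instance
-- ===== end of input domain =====

-- B replaces A's groupby/enumerate index-difference grouping with one explicit loop
-- tracking the current run's start and previous value (objective: simpler).

-- ===== PORT A =====
-- enumerate(years)
def pvEnumFrom (i : Int) : List Int → List (Int × Int)
  | [] => []
  | y :: ys => (i, y) :: pvEnumFrom (i + 1) ys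

-- groupby(enumerate(years), lambda e: e[1] - e[0]) with the group values collected;
-- the current group is accumulated in reverse and reversed when the key changes.
def pvGroupGo (k : Int) (cur : List Int) : List (Int × Int) → List (List Int)
  | [] => [cur.reverse]
  | (i, y) :: rest =>
      if y - i = k then pvGroupGo k (y :: cur) rest
      else cur.reverse :: pvGroupGo (y - i) [y] rest

-- str(range_[0]) if len(range_)==1 else joiner.join([str(range_[0]), str(range_[-1])])
-- (groups are never empty, so the 0 defaults are unreachable)
def pvStrA (joiner : String) (r : List Int) : String :=
  if r.length = 1 then PySem.Int.toStr (r.headD 0)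
  else PySem.Str.join joiner [PySem.Int.toStr (r.headD 0), PySem.Int.toStr (r.getLastD 0)]

def copyright_years (years : List Int) (seperator : String) (joiner : String) : String :=
  let ranges : List (List Int) :=
    match pvEnumFrom 0 years with
    | [] => []
    | (i, y) :: rest => pvGroupGo (y - i) [y] rest
  PySem.Str.join seperator (ranges.map (pvStrA joiner))

-- ===== PORT B =====
-- str(start) if start == prev else joiner.join([str(start), str(prev)])
def pvFlushB (joiner : String) (start prev : Int) : String :=
  if start = prev then PySem.Int.toStr start
  else PySem.Str.join joiner [PySem.Int.toStr start, PySem.Int.toStr prev]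

-- the loop over the remaining years, flushing a chunk whenever y ≠ prev + 1
def pvRunB (joiner : String) (start prev : Int) : List Int → List String
  | [] => [pvFlushB joiner start prev]
  | y :: ys =>
      if y = prev + 1 then pvRunB joiner start y ys
      else pvFlushB joiner start prev :: pvRunB joiner y y ys

def copyright_years_alt (years : List Int) (seperator : String) (joiner : String) : String :=
  match years with
  | [] => ""
  | y :: rest => PySem.Str.join seperator (pvRunB joiner y y rest)

-- ===== PRECONDITION & SPEC =====
def Spec_copyright_years (years : List Int) (seperator : String) (joiner : String) (out : String) : Prop := out = copyright_years_alt years seperator joiner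
instance (years : List Int) (seperator : String) (joiner : String) (out : String) : Decidable (Spec_copyright_years years seperator joiner out) := by unfold Spec_copyright_years; infer_instance

-- ===== CLAIM (what is proved, stated in full; the proofs are below) =====
def Claim_equal_copyright_years : Prop := ∀ (years : List Int) (seperator : String) (joiner : String), Dom_copyright_years years seperator joiner → Spec_copyright_years years seperator joiner (copyright_years years seperator joiner)

-- ===== LEMMAS AND PROOFS =====

-- a nonempty list's getLastD ignores its default
lemma getLastD_ne_nil {cur : List Int} (h : cur ≠ []) (d d' : Int) :
    cur.getLastD d = cur.getLastD d' := by
  cases cur with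
  | nil => exact absurd rfl h
  | cons c cs => simp [List.getLastD_eq_getLast?, List.getLast?_cons]

-- reversing swaps headD and getLastD on a nonempty list
lemma headD_reverse (c : Int) (cs : List Int) (d : Int) :
    (c :: cs).reverse.headD d = (c :: cs).getLastD d := by
  simp [List.headD_eq_head?_getD, List.head?_reverse, List.getLast?_cons,
    List.getLastD_eq_getLast?]

lemma getLastD_reverse (c : Int) (cs : List Int) (d : Int) :
    (c :: cs).reverse.getLastD d = (c :: cs).headD d := by
  simp [List.getLastD_eq_getLast?, List.getLast?_reverse]

-- flushing A's reversed accumulator equals B's flush, given the run invariants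
lemma strA_reverse_eq_flush (joiner : String) (cur : List Int) (start prev : Int)
    (hne : cur ≠ []) (hh : cur.headD 0 = prev) (hl : cur.getLastD 0 = start)
    (hiff : cur.length = 1 ↔ start = prev) :
    pvStrA joiner cur.reverse = pvFlushB joiner start prev := by
  cases cur with
  | nil => exact absurd rfl hne
  | cons c cs =>
    unfold pvStrA pvFlushB
    rw [headD_reverse, getLastD_reverse, hh, hl, List.length_reverse]
    by_cases hlen : (c :: cs).length = 1
    · have hsp : start = prev := hiff.mp hlen
      rw [if_pos hlen, if_pos hsp, hsp]
    · have hsp : ¬ start = prev := fun h => hlen (hiff.mpr h)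
      rw [if_neg hlen, if_neg hsp]

-- main invariant: A's grouping loop mapped through pvStrA equals B's run loop
lemma go_eq_run (joiner : String) :
    ∀ (ys : List Int) (i start prev : Int) (cur : List Int),
      cur ≠ [] → cur.headD 0 = prev → cur.getLastD 0 = start → start ≤ prev →
      (cur.length = 1 ↔ start = prev) →
      (pvGroupGo (prev - i) cur (pvEnumFrom (i + 1) ys)).map (pvStrA joiner)
        = pvRunB joiner start prev ys := by
  intro ys
  induction ys with
  | nil =>
    intro i start prev cur hne hh hl hle hiff
    simp [pvEnumFrom, pvGroupGo, pvRunB,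
      strA_reverse_eq_flush joiner cur start prev hne hh hl hiff]
  | cons y ys ih =>
    intro i start prev cur hne hh hl hle hiff
    simp only [pvEnumFrom, pvGroupGo, pvRunB]
    by_cases hk : y = prev + 1
    · have hc : y - (i + 1) = prev - i := by omega
      rw [if_pos hc, if_pos hk]
      have : prev - i = y - (i + 1) := by omega
      rw [this]
      refine ih (i + 1) start y (y :: cur) (by simp) (by simp) ?_ (by omega) ?_
      · rw [show (y :: cur).getLastD 0 = cur.getLastD y from List.getLastD_cons .., ← hl]
        exact getLastD_ne_nil hne y 0
      · constructor
        · intro h; simp at h; exact absurd h hne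
        · intro h; omega
    · have hc : ¬ y - (i + 1) = prev - i := by omega
      rw [if_neg hc, if_neg hk]
      simp only [List.map_cons]
      rw [strA_reverse_eq_flush joiner cur start prev hne hh hl hiff]
      congr 1
      have := ih (i + 1) y y [y] (by simp) (by simp) (by simp) le_rfl (by simp)
      simpa using this

-- ===== VERDICT (by name: the statement is the Claim_ definition above) =====
theorem copyright_years_spec : Claim_equal_copyright_years := by
  intro years seperator joiner _
  unfold Spec_copyright_years copyright_years copyright_years_alt
  cases years with
  | nil => simp [pvEnumFrom, PySem.Str.join]
  | cons y rest =>
    simp only [pvEnumFrom]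
    have := go_eq_run joiner rest 0 y y [y] (by simp) (by simp) (by simp) le_rfl (by simp)
    rw [show y - 0 = y - 0 from rfl]
    norm_num at this ⊢
    rw [this]
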